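-- pv_equiv track=rewrite | github.com/VenkataExasol/mes-ai-analytics | hackathon-proj/scripts/mes_connector_cli.py | _parse_column_specs
-- ===== SOURCE A (Python) =====
-- def _parse_column_specs(raw: str) -> dict[str, str]:
--     out: dict[str, str] = {}
--     parts = [p.strip() for p in _split_top_level(raw) if p.strip()]
--     for part in parts:
--         if ":" not in part:
--             raise ValueError(
--                 f"Invalid column spec '{part}'. Expected format name:TYPE, e.g. id:VARCHAR(100)"
--             )
--         name, sql_type = part.split(":", 1)
--         name = name.strip()
--         sql_type = sql_type.strip()
--         if not name or not sql_type:
--             raise ValueError(f"Invalid column spec '{part}'")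
--         out[name] = sql_type
--     if not out:
--         raise ValueError("At least one column definition is required")
--     return out
--
-- def _split_top_level(raw: str) -> list[str]:
--     parts: list[str] = []
--     buf: list[str] = []
--     depth = 0
--     for ch in raw:
--         if ch == "(":
--             depth += 1
--             buf.append(ch)
--             continue
--         if ch == ")":
--             depth = max(0, depth - 1)
--             buf.append(ch)
--             continue
--         if ch == "," and depth == 0:
--             parts.append("".join(buf))
--             buf = []
--             continue
--         buf.append(ch)
--     if buf:
--         parts.append("".join(buf))
--     return parts
-- ===== SOURCE B (Python) =====
-- def _parse_column_specs(raw: str) -> dict[str, str]: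
--     # Split on ALL commas first, then regroup pieces whose parens are still open.
--     out: dict[str, str] = {}
--     pending: list[str] = []
--     depth = 0
--     for piece in raw.split(","):
--         for ch in piece:
--             if ch == "(":
--                 depth += 1
--             elif ch == ")":
--                 depth = max(0, depth - 1)
--         if depth == 0:
--             _store(out, ",".join(pending + [piece]))
--             pending = []
--         else:
--             pending.append(piece)
--     if pending:
--         _store(out, ",".join(pending))
--     if not out:
--         raise ValueError("At least one column definition is required")
--     return out
--
--
-- def _store(out: dict[str, str], seg: str) -> None:
--     seg = seg.strip()
--     if not seg:
--         return
--     if ":" not in seg: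
--         raise ValueError(
--             f"Invalid column spec '{seg}'. Expected format name:TYPE, e.g. id:VARCHAR(100)"
--         )
--     name, sql_type = seg.split(":", 1)
--     name = name.strip()
--     sql_type = sql_type.strip()
--     if not name or not sql_type:
--         raise ValueError(f"Invalid column spec '{seg}'")
--     out[name] = sql_type
-- ===== Notes on version B (the rewrite author's own statement) =====
-- stated objective: alternative
-- what changed: B splits the input on every comma up front (str.split) and then regroups consecutive pieces whose parentheses are still open, instead of A's character-by-character scan that detects top-level commas with a depth counter while building a buffer.
import Mathlib
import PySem

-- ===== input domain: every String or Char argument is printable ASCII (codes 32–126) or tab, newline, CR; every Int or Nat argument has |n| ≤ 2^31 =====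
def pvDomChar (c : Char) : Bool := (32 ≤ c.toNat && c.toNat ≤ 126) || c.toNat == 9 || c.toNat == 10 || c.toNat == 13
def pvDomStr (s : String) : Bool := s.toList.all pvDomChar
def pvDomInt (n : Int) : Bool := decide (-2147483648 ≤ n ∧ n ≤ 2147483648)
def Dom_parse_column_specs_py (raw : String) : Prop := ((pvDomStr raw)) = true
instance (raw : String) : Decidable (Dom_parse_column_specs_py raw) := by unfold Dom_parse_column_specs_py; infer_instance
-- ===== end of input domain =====

-- B replaces A's character-by-character top-level split with: split the string on
-- EVERY comma first (str.split), then regroup consecutive pieces whose parentheses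
-- are still open; same return value. Python A/B raise ValueError on malformed
-- specs: those inputs are excluded by Pre_.

-- ===== PORT A =====
-- one step of _split_top_level's loop; Nat subtraction gives Python's max(0, depth-1)
def pvStepA (st : List String × List Char × Nat) (ch : Char) : List String × List Char × Nat :=
  if ch = '(' then (st.1, st.2.1 ++ [ch], st.2.2 + 1)
  else if ch = ')' then (st.1, st.2.1 ++ [ch], st.2.2 - 1)
  else if ch = ',' ∧ st.2.2 = 0 then (st.1 ++ [String.ofList st.2.1], [], st.2.2)
  else (st.1, st.2.1 ++ [ch], st.2.2)

def pvSplitTopLevel (raw : String) : List String :=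
  let st := raw.toList.foldl pvStepA ([], [], 0)
  if st.2.1 = [] then st.1 else st.1 ++ [String.ofList st.2.1]

-- body of A's `for part in parts` loop (part already stripped and nonempty);
-- where the Python raises ValueError (no ':', empty name/type) the port skips: Pre_ excludes those inputs
def pvInsPart (out : PySem.Dict String String) (part : String) : PySem.Dict String String :=
  if PySem.Str.isIn ":" part = false then out
  else match PySem.Str.splitMax? part ":" 1 with
    | some (name :: sql_type :: _) =>
        let name := PySem.Str.strip name
        let sql_type := PySem.Str.strip sql_type
        if name = "" ∨ sql_type = "" then out else out.insert name sql_type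
    | _ => out

def parse_column_specs_py (raw : String) : List (String × String) :=
  let parts := (pvSplitTopLevel raw).filterMap
    (fun p => let s := PySem.Str.strip p; if s = "" then none else some s)
  (parts.foldl pvInsPart PySem.Dict.empty).items

-- ===== PORT B =====
-- B's _store(out, seg): strip, skip if empty, else parse name:TYPE (ValueError cases skip: Pre_ excludes them)
def pvStore (out : PySem.Dict String String) (seg : String) : PySem.Dict String String :=
  let s := PySem.Str.strip seg
  if s = "" then out
  else if PySem.Str.isIn ":" s = false then out
  else match PySem.Str.splitMax? s ":" 1 with
    | some (name :: sql_type :: _) =>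
        let name := PySem.Str.strip name
        let sql_type := PySem.Str.strip sql_type
        if name = "" ∨ sql_type = "" then out else out.insert name sql_type
    | _ => out

-- inner `for ch in piece` loop of B: depth update only (max(0, depth-1) is Nat sub)
def pvDepthStep (d : Nat) (ch : Char) : Nat :=
  if ch = '(' then d + 1 else if ch = ')' then d - 1 else d

-- body of B's `for piece in raw.split(",")` loop: state = (out, pending, depth)
def pvStepB (st : PySem.Dict String String × List String × Nat) (piece : String) :
    PySem.Dict String String × List String × Nat :=
  let d := piece.toList.foldl pvDepthStep st.2.2
  if d = 0 then (pvStore st.1 (PySem.Str.join "," (st.2.1 ++ [piece])), [], d)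
  else (st.1, st.2.1 ++ [piece], d)

def parse_column_specs_py_alt (raw : String) : List (String × String) :=
  let pieces := (raw.toList.splitOn ',').map String.ofList   -- raw.split(",")
  let st := pieces.foldl pvStepB (PySem.Dict.empty, [], 0)
  (if st.2.1 = [] then st.1 else pvStore st.1 (PySem.Str.join "," st.2.1)).items

-- ===== PRECONDITION & SPEC =====
-- independent top-level split used only by Pre_ (not either port)
def pvSegs : List Char → Nat → List (List Char)
  | [], _ => [[]]
  | c :: rest, d =>
    if c = ',' ∧ d = 0 then [] :: pvSegs rest 0
    else
      let d' := if c = '(' then d + 1 else if c = ')' then d - 1 else d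
      match pvSegs rest d' with
      | s :: ss => (c :: s) :: ss
      | [] => [[c]]

def pvValidSpec (s : String) : Bool :=
  match PySem.Str.splitMax? s ":" 1 with
  | some (n :: t :: _) => PySem.Str.strip n != "" && PySem.Str.strip t != ""
  | _ => false

-- Pre_: the Python raises ValueError unless every nonempty stripped top-level segment
-- is a valid column spec (a colon with nonempty name and type) and at least one exists.
def Pre_parse_column_specs_py (raw : String) : Prop :=
  let segs := ((pvSegs raw.toList 0).map (fun l => PySem.Str.strip (String.ofList l))).filter (· ≠ "")
  segs ≠ [] ∧ ∀ s ∈ segs, pvValidSpec s = true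
instance (raw : String) : Decidable (Pre_parse_column_specs_py raw) := by
  unfold Pre_parse_column_specs_py; infer_instance

def pvWitness_parse_column_specs_py : String := "id:VARCHAR(100), qty : INT"

def Spec_parse_column_specs_py (raw : String) (out : List (String × String)) : Prop := out = parse_column_specs_py_alt raw
instance (raw : String) (out : List (String × String)) : Decidable (Spec_parse_column_specs_py raw out) := by unfold Spec_parse_column_specs_py; infer_instance

-- ===== CLAIM (what is proved, stated in full; the proofs are below) =====
def Claim_equal_parse_column_specs_py : Prop := ∀ (raw : String), Dom_parse_column_specs_py raw → Pre_parse_column_specs_py raw → Spec_parse_column_specs_py raw (parse_column_specs_py raw)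

-- ===== LEMMAS AND PROOFS =====

-- pvStore seg = strip seg then (skip empty / A's per-part body)
theorem pvStore_eq (out : PySem.Dict String String) (seg : String) :
    pvStore out seg =
      (let s := PySem.Str.strip seg; if s = "" then out else pvInsPart out s) := rfl

-- A's per-part loop over the filtered/stripped segments = folding pvStore over the raw segments
theorem foldl_filterMap_strip (l : List String) (out : PySem.Dict String String) :
    (l.filterMap (fun p => let s := PySem.Str.strip p; if s = "" then none else some s)).foldl
      pvInsPart out = l.foldl pvStore out := by
  induction l generalizing out with
  | nil => rfl
  | cons p rest ih =>
    by_cases h : PySem.Str.strip p = "" <;>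
      simp [h, pvStore_eq, ih, pvInsPart]

-- fused char scan used ONLY as a proof intermediary between the two ports
def pvStepC (st : PySem.Dict String String × List Char × Nat) (ch : Char) :
    PySem.Dict String String × List Char × Nat :=
  if ch = '(' then (st.1, st.2.1 ++ [ch], st.2.2 + 1)
  else if ch = ')' then (st.1, st.2.1 ++ [ch], st.2.2 - 1)
  else if ch = ',' ∧ st.2.2 = 0 then (pvStore st.1 (String.ofList st.2.1), [], st.2.2)
  else (st.1, st.2.1 ++ [ch], st.2.2)

def pvFin (st : PySem.Dict String String × List Char × Nat) : PySem.Dict String String :=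
  pvStore st.1 (String.ofList st.2.1)

theorem strip_nil : PySem.Str.strip "" = "" := by decide

theorem pvStore_empty (out : PySem.Dict String String) : pvStore out "" = out := by
  simp [pvStore_eq, strip_nil]

-- invariant I: the fused char scan = A's split-scan with the parsed prefix folded in
theorem scan_invariant (l : List Char) (parts : List String) (buf : List Char) (d : Nat)
    (out : PySem.Dict String String) :
    l.foldl pvStepC (parts.foldl pvStore out, buf, d) =
      ((l.foldl pvStepA (parts, buf, d)).1.foldl pvStore out,
       (l.foldl pvStepA (parts, buf, d)).2) := by
  induction l generalizing parts buf d with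
  | nil => rfl
  | cons ch rest ih =>
    simp only [List.foldl_cons]
    by_cases h1 : ch = '('
    · simp only [pvStepA, pvStepC, if_pos h1]; exact ih parts (buf ++ [ch]) (d + 1)
    · by_cases h2 : ch = ')'
      · simp only [pvStepA, pvStepC, if_neg h1, if_pos h2]; exact ih parts (buf ++ [ch]) (d - 1)
      · by_cases h3 : ch = ',' ∧ d = 0
        · simp only [pvStepA, pvStepC, if_neg h1, if_neg h2, if_pos h3]
          have := ih (parts ++ [String.ofList buf]) [] d
          simpa [List.foldl_append] using this
        · simp only [pvStepA, pvStepC, if_neg h1, if_neg h2, if_neg h3]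
          exact ih parts (buf ++ [ch]) d

-- A's value = finishing the fused char scan over the whole string
theorem A_eq_scanC (raw : String) :
    parse_column_specs_py raw =
      (pvFin (raw.toList.foldl pvStepC (PySem.Dict.empty, [], 0))).items := by
  simp only [parse_column_specs_py, pvSplitTopLevel]
  rw [foldl_filterMap_strip]
  have h := scan_invariant raw.toList [] [] 0 PySem.Dict.empty
  simp only [List.foldl_nil] at h
  rw [h]
  by_cases hb : (raw.toList.foldl pvStepA ([], [], 0)).2.1 = []
  · simp [hb, pvFin, pvStore_empty]
  · simp [hb, pvFin, List.foldl_append]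

-- a comma-free chunk only grows the buffer and updates the depth
theorem scanC_comma_free (l : List Char) (hl : ',' ∉ l) (out : PySem.Dict String String)
    (buf : List Char) (d : Nat) :
    l.foldl pvStepC (out, buf, d) = (out, buf ++ l, l.foldl pvDepthStep d) := by
  induction l generalizing buf d with
  | nil => simp
  | cons c rest ih =>
    have hc : c ≠ ',' := fun h => hl (h ▸ List.mem_cons_self)
    have hr : ',' ∉ rest := fun h => hl (List.mem_cons_of_mem _ h)
    by_cases h1 : c = '('
    · simp only [List.foldl_cons, pvStepC, pvDepthStep, if_pos h1, ih hr]; simp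
    · by_cases h2 : c = ')'
      · simp only [List.foldl_cons, pvStepC, pvDepthStep, if_neg h1, if_pos h2, ih hr]; simp
      · have h3 : ¬ (c = ',' ∧ d = 0) := fun h => hc h.1
        simp only [List.foldl_cons, pvStepC, pvDepthStep, if_neg h1, if_neg h2, if_neg h3, ih hr]
        simp

theorem intercalate_cons (p : List Char) (rest : List (List Char)) :
    [','].intercalate (p :: rest) =
      p ++ (match rest with | [] => [] | _ => ',' :: [','].intercalate rest) := by
  cases rest with
  | nil => simp [List.intercalate]
  | cons q r => simp [List.intercalate]

theorem comma_toList : (",":String).toList = [','] := rfl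

theorem intercalate_append_singleton (xs : List (List Char)) (y : List Char) (h : xs ≠ []) :
    [','].intercalate (xs ++ [y]) = [','].intercalate xs ++ ',' :: y := by
  induction xs with
  | nil => cases h rfl
  | cons a t ih =>
    cases t with
    | nil => simp [List.intercalate]
    | cons b r =>
      rw [List.cons_append, intercalate_cons, intercalate_cons a (b :: r)]
      simp only []
      rw [ih (by simp)]
      simp

theorem join_nil_str : PySem.Str.join "," ([] : List String) = "" := by decide

theorem join_singleton (p : List Char) :
    (PySem.Str.join "," [String.ofList p]).toList = p := by
  simp [PySem.Str.join, PySem.Chars.join, List.intercalate]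

theorem join_append_singleton (pending : List String) (p : List Char) (hp : pending ≠ []) :
    (PySem.Str.join "," (pending ++ [String.ofList p])).toList =
      (PySem.Str.join "," pending).toList ++ ',' :: p := by
  simp only [PySem.Str.join, PySem.Chars.join, List.map_append, List.map_cons, List.map_nil,
    String.toList_ofList, comma_toList]
  rw [intercalate_append_singleton _ _ (by simpa using hp)]

-- the characters still ahead of the fused scan when B is about to process pieces ps
def pvCS (pending : List String) (ps : List (List Char)) : List Char :=
  match ps with
  | [] => []
  | _ => (if pending = [] then [] else [',']) ++ [','].intercalate ps

-- evaluating one pvStepC step on a comma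
theorem stepC_comma (out : PySem.Dict String String) (buf : List Char) (d : Nat) :
    pvStepC (out, buf, d) ',' =
      if d = 0 then (pvStore out (String.ofList buf), [], d) else (out, buf ++ [','], d) := by
  by_cases h : d = 0 <;> simp [pvStepC, h]

-- B's finalization step (`if pending: _store(...)`), named for the proofs
def pvFinB (st : PySem.Dict String String × List String × Nat) : PySem.Dict String String :=
  if st.2.1 = [] then st.1 else pvStore st.1 (PySem.Str.join "," st.2.1)

-- main bridge: B's piece loop = the fused char scan over the remaining characters
set_option maxHeartbeats 1000000 in
theorem piece_scan (ps : List (List Char)) (hps : ∀ p ∈ ps, ',' ∉ p)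
    (pending : List String) (d : Nat) (out : PySem.Dict String String)
    (hd : pending ≠ [] → d ≠ 0) :
    pvFinB ((ps.map String.ofList).foldl pvStepB (out, pending, d)) =
    pvFin ((pvCS pending ps).foldl pvStepC (out, (PySem.Str.join "," pending).toList, d)) := by
  induction ps generalizing pending d out with
  | nil =>
    simp only [pvCS, List.map_nil, List.foldl_nil, pvFin, pvFinB]
    by_cases hpend : pending = []
    · subst hpend
      rw [if_pos rfl, join_nil_str]
      rw [show (("":String).toList) = [] from rfl, show String.ofList [] = "" from rfl,
        pvStore_empty]
    · rw [if_neg hpend, String.ofList_toList]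
  | cons p rest ih =>
    have hp : ',' ∉ p := hps p List.mem_cons_self
    have hrest : ∀ q ∈ rest, ',' ∉ q := fun q hq => hps q (List.mem_cons_of_mem _ hq)
    -- RHS: consume the optional comma, then p's characters
    have hscan : (pvCS pending (p :: rest)).foldl pvStepC
        (out, (PySem.Str.join "," pending).toList, d) =
        (match rest with | [] => [] | _ => ',' :: [','].intercalate rest).foldl pvStepC
          (out, (PySem.Str.join "," (pending ++ [String.ofList p])).toList,
           p.foldl pvDepthStep d) := by
      by_cases hpend : pending = []
      · subst hpend
        have h1 : pvCS [] (p :: rest) = [','].intercalate (p :: rest) := by simp [pvCS]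
        rw [h1, intercalate_cons, List.foldl_append, join_nil_str,
          show (("":String).toList) = [] from rfl, scanC_comma_free p hp]
        congr 1
        simp only [List.nil_append]
        rw [join_singleton]
      · have hd0 : d ≠ 0 := hd hpend
        have h1 : pvCS pending (p :: rest) = ',' :: [','].intercalate (p :: rest) := by
          unfold pvCS; rw [if_neg hpend]; rfl
        rw [h1, List.foldl_cons, stepC_comma, if_neg hd0, intercalate_cons,
          List.foldl_append, scanC_comma_free p hp]
        congr 1
        rw [join_append_singleton pending p hpend]
        simp [List.append_assoc]
    rw [hscan]
    -- LHS: one pvStepB step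
    simp only [List.map_cons, List.foldl_cons, pvStepB, String.toList_ofList]
    by_cases hd0 : p.foldl pvDepthStep d = 0
    · simp only [if_pos hd0]
      cases rest with
      | nil => simp [pvFinB, pvFin, PySem.Str.join, PySem.Chars.join]
      | cons q r =>
        rw [ih hrest [] (p.foldl pvDepthStep d) _ (fun h => absurd rfl h)]
        have h2 : pvCS [] (q :: r) = [','].intercalate (q :: r) := by simp [pvCS]
        simp only [h2, join_nil_str]
        rw [List.foldl_cons, stepC_comma, if_pos hd0, String.ofList_toList,
          show (("":String).toList) = ([] : List Char) from rfl]
    · simp only [if_neg hd0]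
      rw [ih hrest (pending ++ [String.ofList p]) (p.foldl pvDepthStep d) out
        (fun _ => hd0)]
      cases rest with
      | nil => simp [pvCS]
      | cons q r => simp [pvCS]

theorem splitOnP_comma_free (l : List Char) :
    ∀ p ∈ List.splitOnP (fun c => c == ',') l, ',' ∉ p := by
  induction l with
  | nil => intro p hp; rw [List.splitOnP_nil] at hp; simp at hp; simp [hp]
  | cons c rest ih =>
    intro p hp
    rw [List.splitOnP_cons] at hp
    by_cases hc : c = ','
    · simp only [hc, beq_self_eq_true] at hp
      rcases List.mem_cons.mp hp with h | h
      · simp [h]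
      · exact ih p h
    · have : (c == ',') = false := by simp [hc]
      rw [this] at hp; simp only [Bool.false_eq_true, if_false] at hp
      cases hsp : List.splitOnP (fun c => c == ',') rest with
      | nil => exact absurd hsp (List.splitOnP_ne_nil _ _)
      | cons h t =>
        rw [hsp] at hp
        simp only [List.modifyHead_cons] at hp
        rcases List.mem_cons.mp hp with hpe | hpe
        · subst hpe
          intro hmem
          rcases List.mem_cons.mp hmem with h1 | h1
          · exact hc h1.symm
          · exact ih h (by rw [hsp]; exact List.mem_cons_self) h1
        · exact ih p (by rw [hsp]; exact List.mem_cons_of_mem _ hpe)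

theorem splitOn_comma_free (l : List Char) : ∀ p ∈ l.splitOn ',', ',' ∉ p := by
  have : l.splitOn ',' = List.splitOnP (fun c => c == ',') l := rfl
  rw [this]; exact splitOnP_comma_free l

-- ===== VERDICT (by name: the statement is the Claim_ definition above) =====
theorem parse_column_specs_py_spec : Claim_equal_parse_column_specs_py := by
  intro raw _ _
  show parse_column_specs_py raw = parse_column_specs_py_alt raw
  rw [A_eq_scanC]
  show _ = (pvFinB (((raw.toList.splitOn ',').map String.ofList).foldl pvStepB
      (PySem.Dict.empty, [], 0))).items
  rw [piece_scan (raw.toList.splitOn ',') (splitOn_comma_free raw.toList) [] 0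
        PySem.Dict.empty (by simp)]
  have hne : raw.toList.splitOn ',' ≠ [] := List.splitOnP_ne_nil _ _
  have hcs : pvCS [] (raw.toList.splitOn ',') = raw.toList := by
    unfold pvCS
    cases h : raw.toList.splitOn ',' with
    | nil => exact absurd h hne
    | cons a b =>
        simp only [if_pos, List.nil_append]
        rw [← h, List.intercalate_splitOn]
  rw [hcs]
  have : (PySem.Str.join "," ([] : List String)).toList = [] := by decide
  rw [this]
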